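-- pv_equiv track=rewrite | github.com/t4lentles5/t4lentles5-dots | config/quickshell/Scripts/parse_keybinds.py | expand_nvim_key
-- ===== SOURCE A (Python) =====
-- NVIM_KEY_MAP = {
--     "<Esc>": "Esc",
--     "<C-h>": "Ctrl+H",
--     "<C-j>": "Ctrl+J",
--     "<C-k>": "Ctrl+K",
--     "<C-l>": "Ctrl+L",
--     "<C-Up>": "Ctrl+↑",
--     "<C-Down>": "Ctrl+↓",
--     "<C-Left>": "Ctrl+←",
--     "<C-Right>": "Ctrl+→",
--     "<S-h>": "Shift+H",
--     "<S-l>": "Shift+L",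
--     "<leader>": "Space",
-- }
--
-- def expand_nvim_key(raw_key):
--     """Convert a neovim key like '<leader>gg' or '<C-h>' into UI key parts."""
--     keys = []
--     i = 0
--     s = raw_key.strip().strip('"').strip("'")
--
--     while i < len(s):
--         if s[i] == "<":
--             end = s.find(">", i)
--             if end != -1:
--                 token = s[i : end + 1]
--                 mapped = str(NVIM_KEY_MAP.get(token, token.strip("<>")))
--                 if "+" in mapped:
--                     parts = mapped.split("+")
--                     keys.extend(parts)
--                 else:
--                     keys.append(mapped)
--                 i = end + 1
--             else:
--                 keys.append(s[i])
--                 i += 1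
--         else:
--             keys.append(s[i])
--             i += 1
--
--     return keys
-- ===== SOURCE B (Python) =====
-- import re
--
-- NVIM_KEY_MAP = {
--     "<Esc>": "Esc",
--     "<C-h>": "Ctrl+H",
--     "<C-j>": "Ctrl+J",
--     "<C-k>": "Ctrl+K",
--     "<C-l>": "Ctrl+L",
--     "<C-Up>": "Ctrl+\u2191",
--     "<C-Down>": "Ctrl+\u2193",
--     "<C-Left>": "Ctrl+\u2190",
--     "<C-Right>": "Ctrl+\u2192",
--     "<S-h>": "Shift+H",
--     "<S-l>": "Shift+L",
--     "<leader>": "Space",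
-- }
--
-- _TOKEN = re.compile(r'<[^>]*>|[\s\S]')
--
-- def expand_nvim_key(raw_key):
--     """Convert a neovim key like '<leader>gg' or '<C-h>' into UI key parts."""
--     s = raw_key.strip().strip('"').strip("'")
--     keys = []
--     for m in _TOKEN.finditer(s):
--         t = m.group()
--         if len(t) > 1:
--             mapped = str(NVIM_KEY_MAP.get(t, t.strip("<>")))
--             keys += mapped.split("+") if "+" in mapped else [mapped]
--         else:
--             keys.append(t)
--     return keys
-- ===== Notes on version B (the rewrite author's own statement) =====
-- stated objective: idiomatic
-- what changed: Replaced A's manual index-based while loop with a regex-style tokenizer pass (bracketed token or single character) followed by a per-token expansion.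
import Mathlib
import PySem

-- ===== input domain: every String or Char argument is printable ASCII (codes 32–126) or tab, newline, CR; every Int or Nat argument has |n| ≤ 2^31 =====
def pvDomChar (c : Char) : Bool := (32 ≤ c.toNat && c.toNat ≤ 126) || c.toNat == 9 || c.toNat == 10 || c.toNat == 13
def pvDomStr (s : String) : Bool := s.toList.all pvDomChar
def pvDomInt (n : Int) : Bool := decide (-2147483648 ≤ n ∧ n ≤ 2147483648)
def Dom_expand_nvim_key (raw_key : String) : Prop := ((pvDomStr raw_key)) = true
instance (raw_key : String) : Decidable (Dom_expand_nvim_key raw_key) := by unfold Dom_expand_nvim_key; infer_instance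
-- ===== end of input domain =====

-- B replaces A's manual index/`find` while-loop with a regex-style tokenizer pass
-- ('<[^>]*>' token or single char) followed by a per-token expansion; objective: idiomatic.

-- NVIM_KEY_MAP, a module constant shared by both programs
def pvNvimKeyMap : PySem.Dict String String := PySem.Dict.ofList
  [("<Esc>", "Esc"), ("<C-h>", "Ctrl+H"), ("<C-j>", "Ctrl+J"), ("<C-k>", "Ctrl+K"),
   ("<C-l>", "Ctrl+L"), ("<C-Up>", "Ctrl+↑"), ("<C-Down>", "Ctrl+↓"),
   ("<C-Left>", "Ctrl+←"), ("<C-Right>", "Ctrl+→"), ("<S-h>", "Shift+H"),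
   ("<S-l>", "Shift+L"), ("<leader>", "Space")]

-- ===== PORT A =====
-- A's while-loop over index i, transcribed as recursion on the remaining suffix of s;
-- s.find(">", i) becomes PySem.Chars.find on that suffix (exact: same first-'>' search).
def expand_nvim_key_go (keys : List String) (cs : List Char) : List String :=
  match cs with
  | [] => keys
  | c :: rest =>
    if c = '<' then
      let e := PySem.Chars.find (c :: rest) ['>']
      if e ≠ -1 then
        let token := (c :: rest).take (e.toNat + 1)
        let mapped := pvNvimKeyMap.getD (String.ofList token)
          (String.ofList (PySem.Chars.stripChars token ['<', '>']))
        let keys' := if PySem.Str.isIn "+" mapped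
          then keys ++ (PySem.Chars.splitOn mapped.toList ['+']).map String.ofList
          else keys ++ [mapped]
        expand_nvim_key_go keys' ((c :: rest).drop (e.toNat + 1))
      else
        expand_nvim_key_go (keys ++ [String.ofList [c]]) rest
    else
      expand_nvim_key_go (keys ++ [String.ofList [c]]) rest
termination_by cs.length
decreasing_by
  all_goals simp

def expand_nvim_key (raw_key : String) : List String :=
  let s := PySem.Str.stripChars (PySem.Str.stripChars (PySem.Str.strip raw_key) "\"") "'"
  expand_nvim_key_go [] s.toList

-- ===== PORT B =====
-- tokenizer = re.finditer(r'<[^>]*>|[\s\S]', s): a bracketed token where possible, else one char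
def pvTokenize : List Char → List (List Char)
  | [] => []
  | c :: rest =>
    if c = '<' then
      match h : rest.dropWhile (· ≠ '>') with
      | '>' :: r => ('<' :: (rest.takeWhile (· ≠ '>') ++ ['>'])) :: pvTokenize r
      | _ => [c] :: pvTokenize rest
    else [c] :: pvTokenize rest
termination_by cs => cs.length
decreasing_by
  · have := List.length_dropWhile_le (fun x => x ≠ '>') rest
    rw [h] at this; simp at this ⊢; omega
  · simp
  · simp

def pvTokKeys (t : List Char) : List String :=
  if 1 < t.length then
    let mapped := pvNvimKeyMap.getD (String.ofList t)
      (String.ofList (PySem.Chars.stripChars t ['<', '>']))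
    if PySem.Str.isIn "+" mapped
      then (PySem.Chars.splitOn mapped.toList ['+']).map String.ofList
      else [mapped]
  else [String.ofList t]

def expand_nvim_key_alt (raw_key : String) : List String :=
  let s := PySem.Str.stripChars (PySem.Str.stripChars (PySem.Str.strip raw_key) "\"") "'"
  ((pvTokenize s.toList).map pvTokKeys).flatten

-- ===== PRECONDITION & SPEC =====
def Spec_expand_nvim_key (raw_key : String) (out : List String) : Prop := out = expand_nvim_key_alt raw_key
instance (raw_key : String) (out : List String) : Decidable (Spec_expand_nvim_key raw_key out) := by unfold Spec_expand_nvim_key; infer_instance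

-- ===== CLAIM (what is proved, stated in full; the proofs are below) =====
def Claim_equal_expand_nvim_key : Prop := ∀ (raw_key : String), Dom_expand_nvim_key raw_key → Spec_expand_nvim_key raw_key (expand_nvim_key raw_key)

-- ===== LEMMAS AND PROOFS =====

theorem pv_singleton_prefix {c : Char} {l : List Char} : [c] <+: l ↔ l.head? = some c := by
  constructor
  · rintro ⟨t, rfl⟩; rfl
  · intro h
    cases l with
    | nil => simp at h
    | cons x t => simp at h; exact ⟨t, by simp [h]⟩

theorem pv_singleton_infix {c : Char} {l : List Char} : [c] <:+: l ↔ c ∈ l := by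
  constructor
  · rintro ⟨s, t, rfl⟩; simp
  · intro h
    obtain ⟨s, t, rfl⟩ := List.append_of_mem h
    exact ⟨s, t, by simp⟩

theorem pv_takeWhile_len {c : Char} : ∀ (cs : List Char) (n : Nat),
    cs[n]? = some c → (∀ i < n, cs[i]? ≠ some c) →
    (cs.takeWhile (· ≠ c)).length = n := by
  intro cs
  induction cs with
  | nil => intro n h; simp at h
  | cons x t ih =>
    intro n h hmin
    cases n with
    | zero =>
      have hx : x = c := by simpa using h
      rw [List.takeWhile_cons_of_neg (by simp [hx])]
      rfl
    | succ m =>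
      have hx : x ≠ c := by
        intro hc; exact hmin 0 (Nat.succ_pos m) (by simp [hc])
      rw [List.takeWhile_cons_of_pos (by simp [hx]), List.length_cons,
        ih m (by simpa using h) (fun i hi => by
          have := hmin (i + 1) (by omega); simpa using this)]

theorem pv_find_mem {c : Char} {cs : List Char} (h : c ∈ cs) :
    PySem.Chars.find cs [c] = ((cs.takeWhile (· ≠ c)).length : Int) := by
  have hinf : [c] <:+: cs := pv_singleton_infix.mpr h
  have hnn : 0 ≤ PySem.Chars.find cs [c] := (PySem.Chars.find_nonneg_iff _ _).mpr hinf
  obtain ⟨h1, h2⟩ := PySem.Chars.find_spec hnn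
  have hn : cs[(PySem.Chars.find cs [c]).toNat]? = some c := by
    have := pv_singleton_prefix.mp h1
    rwa [List.head?_drop] at this
  have hmin : ∀ i < (PySem.Chars.find cs [c]).toNat, cs[i]? ≠ some c := by
    intro i hi hc
    exact h2 i hi (pv_singleton_prefix.mpr (by rwa [List.head?_drop]))
  have := pv_takeWhile_len cs _ hn hmin
  omega

-- splitting cs at its first occurrence of c
theorem pv_split_first {c : Char} : ∀ (cs : List Char), c ∈ cs →
    cs.take ((cs.takeWhile (· ≠ c)).length + 1) = cs.takeWhile (· ≠ c) ++ [c] ∧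
    cs.drop ((cs.takeWhile (· ≠ c)).length + 1) = (cs.dropWhile (· ≠ c)).tail ∧
    cs.dropWhile (· ≠ c) = c :: (cs.dropWhile (· ≠ c)).tail := by
  intro cs
  induction cs with
  | nil => intro h; simp at h
  | cons x t ih =>
    intro h
    by_cases hx : x = c
    · subst hx
      rw [List.takeWhile_cons_of_neg (by simp), List.dropWhile_cons_of_neg (by simp)]
      simp
    · have ht : c ∈ t := by cases h with
        | head => exact absurd rfl hx
        | tail _ hh => exact hh
      obtain ⟨i1, i2, i3⟩ := ih ht
      rw [List.takeWhile_cons_of_pos (by simp [hx]), List.dropWhile_cons_of_pos (by simp [hx])]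
      refine ⟨?_, ?_, i3⟩
      · rw [List.length_cons, List.take_succ_cons, i1]; simp
      · rw [List.length_cons, List.drop_succ_cons, i2]

theorem pv_go_eq : ∀ (keys : List String) (cs : List Char),
    expand_nvim_key_go keys cs = keys ++ ((pvTokenize cs).map pvTokKeys).flatten := by
  intro keys cs
  induction keys, cs using expand_nvim_key_go.induct with
  | case1 keys => simp [expand_nvim_key_go, pvTokenize]
  | case2 keys rest e hne token mapped keys' ih =>
    have hmem : '>' ∈ '<' :: rest :=
      pv_singleton_infix.mp ((PySem.Chars.find_ne_neg_one_iff _ _).mp hne)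
    have hrest : '>' ∈ rest := by simpa using hmem
    have htw : ('<' :: rest).takeWhile (· ≠ '>') = '<' :: rest.takeWhile (· ≠ '>') :=
      List.takeWhile_cons_of_pos (by decide)
    have hfind : PySem.Chars.find ('<' :: rest) ['>']
        = ((rest.takeWhile (· ≠ '>')).length + 1 : Int) := by
      rw [pv_find_mem hmem, htw]; simp
    obtain ⟨r1, r2, r3⟩ := pv_split_first rest hrest
    have hen : e.toNat = (rest.takeWhile (· ≠ '>')).length + 1 := by
      have h1 : e = ((rest.takeWhile (· ≠ '>')).length + 1 : Int) := hfind
      omega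
    have htok : token = '<' :: (rest.takeWhile (· ≠ '>') ++ ['>']) := by
      show ('<' :: rest).take (e.toNat + 1) = _
      rw [hen, List.take_succ_cons, r1]
    have hdropn : ('<' :: rest).drop (e.toNat + 1) = (rest.dropWhile (· ≠ '>')).tail := by
      rw [hen, List.drop_succ_cons, r2]
    have htokenize : pvTokenize ('<' :: rest)
        = ('<' :: (rest.takeWhile (· ≠ '>') ++ ['>'])) :: pvTokenize ((rest.dropWhile (· ≠ '>')).tail) := by
      rw [pvTokenize, if_pos rfl, r3]
      rfl
    have hlhs : expand_nvim_key_go keys ('<' :: rest)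
        = expand_nvim_key_go keys' (('<' :: rest).drop (e.toNat + 1)) := by
      rw [expand_nvim_key_go, if_pos rfl, if_pos hne]
      rfl
    rw [hlhs, ih, hdropn, htokenize]
    simp only [List.map_cons, List.flatten_cons, ← List.append_assoc]
    congr 1
    have htk : pvTokKeys ('<' :: (rest.takeWhile (· ≠ '>') ++ ['>']))
        = if PySem.Str.isIn "+" mapped
          then (PySem.Chars.splitOn mapped.toList ['+']).map String.ofList else [mapped] := by
      rw [pvTokKeys, if_pos (by simp)]
      rw [← htok]
    rw [htk]
    show keys' = _
    simp only [keys']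
    split <;> rfl
  | case3 keys rest e hne ih =>
    have he : e = -1 := by
      by_contra hc; exact hne hc
    have hnm : '>' ∉ rest := by
      intro hm
      have := pv_find_mem (List.mem_cons_of_mem '<' hm)
      have h1 : e = ((('<' :: rest).takeWhile (· ≠ '>')).length : Int) := this
      omega
    have hdwnil : rest.dropWhile (· ≠ '>') = [] := by
      rw [List.dropWhile_eq_nil_iff]
      intro x hx
      simp only [decide_eq_true_eq]
      intro h; exact hnm (h ▸ hx)
    have hlhs : expand_nvim_key_go keys ('<' :: rest)
        = expand_nvim_key_go (keys ++ [String.ofList ['<']]) rest := by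
      rw [expand_nvim_key_go, if_pos rfl, if_neg hne]
    have htokenize : pvTokenize ('<' :: rest) = ['<'] :: pvTokenize rest := by
      rw [pvTokenize, if_pos rfl, hdwnil]
    rw [hlhs, ih, htokenize]
    simp [pvTokKeys]
  | case4 keys c rest hc ih =>
    have hlhs : expand_nvim_key_go keys (c :: rest)
        = expand_nvim_key_go (keys ++ [String.ofList [c]]) rest := by
      rw [expand_nvim_key_go, if_neg hc]
    have htokenize : pvTokenize (c :: rest) = [c] :: pvTokenize rest := by
      rw [pvTokenize, if_neg hc]
    rw [hlhs, ih, htokenize]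
    simp [pvTokKeys]

-- ===== VERDICT (by name: the statement is the Claim_ definition above) =====
theorem expand_nvim_key_spec : Claim_equal_expand_nvim_key := by
  intro raw_key _
  unfold Spec_expand_nvim_key expand_nvim_key expand_nvim_key_alt
  exact pv_go_eq [] _
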